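-- pv_equiv track=rewrite | github.com/vinas94/BorderConquest | scripts.py | list_columns
-- ===== SOURCE A (Python) =====
-- def list_columns(obj, rows=12, gap=2):
--     '''
--     This function takes in a list of values and transforms it
--     into another list which looks like several columns stacked
--     together as such:
--
--     [1, 2, 3, 4, 5, 6, 7, 8, 9, 10, 11, 12, 13, 14]
--     >>>
--     [' 1   7  13',
--      ' 2   8  14',
--      ' 3   9    ',
--      ' 4  10    ',
--      ' 5  11    ',
--      ' 6  12    ']
--
--     'row' parameter controls the maximum length of each column
--     'gap' parameter controls the spacing between columns
--
--     Adapted from https://stackoverflow.com/questions/1524126/how-to-print-a-list-more-nicely/25048690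
--     '''
--     gap = 2 if len(obj)>rows else 0
--
--     if len(obj)>0:
--         sobj = [str(item) for item in obj]
--         max_len = max([len(item) for item in sobj])
--
--         plist = [sobj[i: i+rows] for i in range(0, len(sobj), rows)]
--         if not len(plist[-1]) == rows:
--             plist[-1].extend(['']*(len(sobj) - len(plist[-1])))
--         plist = zip(*plist)
--         printer = [''.join([c.rjust(max_len + gap) for c in p]) for p in plist]
--         printer = [x[gap:] for x in printer]
--     else:
--         printer = ['']
--
--     return printer
-- ===== SOURCE B (Python) =====
-- def list_columns(obj, rows=12, gap=2):
--     '''Direct row/column index arithmetic: no chunk list, no zip transpose,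
--     no padding pass; the first column is right-justified to the bare width
--     so no leading gap ever has to be stripped.'''
--     if not obj:
--         return ['']
--     gap = 2 if len(obj) > rows else 0
--     sobj = [str(item) for item in obj]
--     width = max(len(s) for s in sobj)
--     nout = min(len(obj), rows)
--     ncols = -(-len(obj) // rows)
--     out = []
--     for r in range(nout):
--         cells = []
--         for c in range(ncols):
--             i = c * rows + r
--             s = sobj[i] if i < len(obj) else ''
--             cells.append(s.rjust(width) if c == 0 else s.rjust(width + gap))
--         out.append(''.join(cells))
--     return out
-- ===== Notes on version B (the rewrite author's own statement) =====
-- stated objective: simpler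
-- what changed: B computes each output row directly by index arithmetic (cell c,r is element c*rows+r, first column padded to the bare width), eliminating A's chunk list, pad-extend pass, zip transpose and leading-gap strip.
import Mathlib
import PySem

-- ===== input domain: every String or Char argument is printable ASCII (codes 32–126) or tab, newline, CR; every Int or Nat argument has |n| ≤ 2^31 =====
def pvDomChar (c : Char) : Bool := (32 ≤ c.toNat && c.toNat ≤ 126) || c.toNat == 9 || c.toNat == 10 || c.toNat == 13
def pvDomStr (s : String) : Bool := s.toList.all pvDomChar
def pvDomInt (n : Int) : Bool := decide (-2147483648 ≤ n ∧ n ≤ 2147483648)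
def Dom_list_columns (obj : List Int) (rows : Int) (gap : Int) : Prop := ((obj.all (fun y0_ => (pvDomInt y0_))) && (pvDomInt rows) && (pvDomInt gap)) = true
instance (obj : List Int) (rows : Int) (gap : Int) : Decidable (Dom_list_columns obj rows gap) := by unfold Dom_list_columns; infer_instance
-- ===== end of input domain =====

-- B builds each row directly by index arithmetic (cell (c,r) is element c*rows+r, first column
-- padded to the bare width), dropping A's chunk list, pad-extend pass, zip transpose and gap strip.

-- shared builtin port: s.rjust(w) with the default space fill (exact: no pad when w <= len(s))
def pyRjust (s : List Char) (w : Int) : List Char := List.replicate (w.toNat - s.length) ' ' ++ s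

-- ===== PORT A =====
-- hand port of zip(*ls) (PySem has only binary zip): rows up to the shortest column, exact
def pyZipCols (ls : List (List (List Char))) : List (List (List Char)) :=
  (List.range (((ls.map List.length).min?).getD 0)).map (fun r => ls.map (fun col => col.getD r []))

def list_columns (obj : List Int) (rows : Int) (gap : Int) : List String :=
  let gap : Int := if (obj.length : Int) > rows then 2 else 0
  if (obj.length : Int) > 0 then
    let sobj := obj.map PySem.Int.toChars
    let max_len : Nat := (PySem.List.max? (sobj.map List.length) (fun y => y)).getD 0
    let plist := (PySem.List.pyRange 0 (obj.length : Int) rows).map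
      (fun i => PySem.List.slice sobj (some i) (some (i + rows)))
    let plist := if ¬(((plist.getLastD []).length : Int) = rows) then
        plist.dropLast ++ [plist.getLastD [] ++ List.replicate (sobj.length - (plist.getLastD []).length) []]
      else plist
    let plistT := pyZipCols plist
    let printer := plistT.map (fun p => (p.map (fun c => pyRjust c ((max_len : Int) + gap))).flatten)
    let printer := printer.map (fun x => PySem.List.slice x (some gap) none)
    printer.map String.ofList
  else [""]

-- ===== PORT B =====
def list_columns_alt (obj : List Int) (rows : Int) (gap : Int) : List String :=
  if obj = [] then [""] else
  let g : Int := if (obj.length : Int) > rows then 2 else 0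
  let sobj := obj.map PySem.Int.toChars
  let width : Nat := (PySem.List.max? (sobj.map List.length) (fun y => y)).getD 0
  let nout : Int := min (obj.length : Int) rows
  let ncols : Int := -(PySem.Int.floordiv (-(obj.length : Int)) rows)
  (List.range nout.toNat).map (fun (r : Nat) =>
    String.ofList (((List.range ncols.toNat).map (fun (c : Nat) =>
      let i : Int := (c : Int) * rows + (r : Int)
      let s : List Char := if i < (obj.length : Int) then sobj.getD i.toNat [] else []
      if c = 0 then pyRjust s (width : Int) else pyRjust s ((width : Int) + g))).flatten))

-- ===== PRECONDITION & SPEC =====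
-- A raises on nonempty obj with rows <= 0 (ValueError from range step 0, IndexError from plist[-1]).
def Pre_list_columns (obj : List Int) (rows : Int) (gap : Int) : Prop := obj = [] ∨ 1 ≤ rows
instance (obj : List Int) (rows : Int) (gap : Int) : Decidable (Pre_list_columns obj rows gap) := by
  unfold Pre_list_columns; infer_instance
def pvWitness_list_columns : List Int × Int × Int := ([1, 2, 3], 2, 2)

def Spec_list_columns (obj : List Int) (rows : Int) (gap : Int) (out : List String) : Prop := out = list_columns_alt obj rows gap
instance (obj : List Int) (rows : Int) (gap : Int) (out : List String) : Decidable (Spec_list_columns obj rows gap out) := by unfold Spec_list_columns; infer_instance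

-- ===== CLAIM (what is proved, stated in full; the proofs are below) =====
def Claim_equal_list_columns : Prop := ∀ (obj : List Int) (rows : Int) (gap : Int), Dom_list_columns obj rows gap → Pre_list_columns obj rows gap → Spec_list_columns obj rows gap (list_columns obj rows gap)

-- ===== LEMMAS AND PROOFS =====

-- dropping the leading gap from a cell padded to width w+g leaves the cell padded to width w
lemma pyRjust_drop_gap (g w : Nat) (s rest : List Char) (hs : s.length ≤ w) :
    (pyRjust s ((w : Int) + (g : Int)) ++ rest).drop g = pyRjust s (w : Int) ++ rest := by
  have h1 : ((w : Int) + (g : Int)).toNat = w + g := by omega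
  have h3 : (w : Int).toNat = w := by omega
  simp only [pyRjust, h1, h3, List.append_assoc, List.drop_append, List.drop_replicate,
    List.length_replicate]
  have e1 : w + g - s.length - g = w - s.length := by omega
  have e2 : g - (w + g - s.length) = 0 := by omega
  rw [e1, e2, List.drop_zero]
  simp

lemma getD_take_drop (xs : List (List Char)) (k R r : Nat) (hr : r < R) :
    (List.take R (List.drop k xs)).getD r [] = xs.getD (k + r) [] := by
  simp [List.getD_eq_getElem?_getD, List.getElem?_drop, hr]

lemma getD_append_replicate_nil (xs : List (List Char)) (t r : Nat) :
    (xs ++ List.replicate t ([] : List Char)).getD r [] = xs.getD r [] := by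
  simp only [List.getD_eq_getElem?_getD, List.getElem?_append, List.getElem?_replicate]
  split_ifs with h h2
  · rfl
  · rw [List.getElem?_eq_none (show xs.length ≤ r by omega)]; rfl
  · rw [List.getElem?_eq_none (show xs.length ≤ r by omega)]

lemma foldl_min_replicate (k x a : Nat) :
    (List.replicate k a).foldl min x = if k = 0 then x else min x a := by
  induction k generalizing x with
  | zero => simp
  | succ m ih =>
    simp only [List.replicate_succ, List.foldl_cons, ih]
    rw [if_neg (Nat.succ_ne_zero m)]
    by_cases h : m = 0
    · simp [h]
    · simp [h]

lemma min?_replicate (k a : Nat) (hk : 1 ≤ k) : (List.replicate k a).min? = some a := by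
  obtain ⟨m, rfl⟩ : ∃ m, k = m + 1 := ⟨k - 1, by omega⟩
  rw [List.replicate_succ, List.min?_cons', foldl_min_replicate]
  split_ifs <;> simp

lemma min?_replicate_append (k a b : Nat) :
    (List.replicate k a ++ [b]).min? = some (if k = 0 then b else min a b) := by
  cases k with
  | zero => simp
  | succ m =>
    rw [List.replicate_succ, List.cons_append, List.min?_cons', List.foldl_append,
      foldl_min_replicate]
    rw [if_neg (Nat.succ_ne_zero m)]
    by_cases h : m = 0
    · simp [h]
    · simp [h]

-- every cell is at most as long as the running maximum A and B both compute
lemma cell_len_le (sobj : List (List Char)) (hne : sobj ≠ []) (i : Nat) :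
    (sobj.getD i []).length ≤ (PySem.List.max? (sobj.map List.length) (fun y => y)).getD 0 := by
  cases h : PySem.List.max? (sobj.map List.length) (fun y => y) with
  | none =>
    rw [PySem.List.max?_eq_none_iff] at h
    simp_all
  | some m =>
    by_cases hi : i < sobj.length
    · rw [List.getD_eq_getElem _ _ hi]
      exact PySem.List.max?_isMax h _ (List.mem_map_of_mem (sobj.getElem_mem hi))
    · rw [List.getD_eq_default _ _ (by omega)]
      exact Nat.zero_le _

-- -(-n // R) is ceiling division
lemma ceil_div_eq (n R : Nat) (hR1 : 1 ≤ R) (hn : 1 ≤ n) :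
    -(PySem.Int.floordiv (-(n : Int)) (R : Int)) = (((n + R - 1) / R : Nat) : Int) := by
  rw [PySem.Int.neg_floordiv_neg_eq_iff_of_pos (show (0:Int) < (R:Int) by exact_mod_cast hR1)]
  have hdiv := Nat.div_add_mod (n + R - 1) R
  have hmod := Nat.mod_lt (n + R - 1) (show 0 < R by omega)
  set q := (n + R - 1) / R with hq
  have hmc : q * R = R * q := Nat.mul_comm _ _
  have hsub : (q - 1) * R = q * R - R := by rw [Nat.sub_mul, one_mul]
  have hnc : 1 ≤ q := Nat.div_pos (by omega) (by omega)
  have hge : n ≤ q * R := by omega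
  have hlt : (q - 1) * R < n := by omega
  constructor
  · have e : ((q : Int) - 1) = ((q - 1 : Nat) : Int) := by omega
    rw [e]
    exact_mod_cast hlt
  · exact_mod_cast hge

-- the chunk comprehension is a map over chunk indices
lemma chunks_eq (sobj : List (List Char)) (n R : Nat) (hR1 : 1 ≤ R) (hn : 1 ≤ n) :
    (PySem.List.pyRange 0 (n : Int) (R : Int)).map
      (fun i => PySem.List.slice sobj (some i) (some (i + (R : Int))))
    = (List.range ((n + R - 1) / R)).map (fun c => List.take R (List.drop (c * R) sobj)) := by
  rw [PySem.List.pyRange_of_pos 0 (n : Int) (show (0:Int) < (R:Int) by exact_mod_cast hR1)]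
  rw [if_pos (show (0:Int) < (n:Int) by exact_mod_cast hn)]
  have hc : ((n : Int) - 0 + (R : Int) - 1) / (R : Int) = (((n + R - 1) / R : Nat) : Int) := by
    rw [Int.natCast_ediv]
    congr 1
    omega
  rw [hc, Int.toNat_natCast, List.map_map]
  apply List.map_congr_left
  intro k _
  have e1 : (0 : Int) + (R : Int) * (k : Int) = ((k * R : Nat) : Int) := by push_cast; ring
  simp only [Function.comp, e1]
  exact PySem.List.slice_natCast_add sobj (k * R) R

-- stripping the gap from a joined row padded uniformly to w+g re-justifies the first cell to w
lemma row_drop_eq (f : Nat → List Char) (m w gN : Nat) (gI : Int) (hg : gI = (gN : Int))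
    (hw : ∀ c, (f c).length ≤ w) :
    (((List.range (m + 1)).map (fun c => pyRjust (f c) ((w : Int) + gI))).flatten).drop gN
    = ((List.range (m + 1)).map (fun c =>
        if c = 0 then pyRjust (f c) (w : Int) else pyRjust (f c) ((w : Int) + gI))).flatten := by
  subst hg
  rw [List.range_succ_eq_map]
  simp only [List.map_cons, List.map_map, List.flatten_cons]
  rw [pyRjust_drop_gap gN w (f 0) _ (hw 0), if_pos trivial]
  apply congrArg
  apply congrArg
  apply List.map_congr_left
  intro c _
  simp [Function.comp]

-- the common normal form both ports compute
def colsNF (obj : List Int) (R : Nat) : List String :=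
  (List.range (min R obj.length)).map (fun r => String.ofList
    (((List.range ((obj.length + R - 1) / R)).map (fun c =>
      if c = 0 then
        pyRjust ((obj.map PySem.Int.toChars).getD (c * R + r) [])
          (((PySem.List.max? ((obj.map PySem.Int.toChars).map List.length) (fun y => y)).getD 0 : Nat) : Int)
      else
        pyRjust ((obj.map PySem.Int.toChars).getD (c * R + r) [])
          ((((PySem.List.max? ((obj.map PySem.Int.toChars).map List.length) (fun y => y)).getD 0 : Nat) : Int)
            + (if ((obj.length : Nat) : Int) > (R : Int) then 2 else 0)))).flatten))

lemma B_eval (obj : List Int) (R : Nat) (gap : Int) (hobj : obj ≠ []) (hR1 : 1 ≤ R) :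
    list_columns_alt obj (R : Int) gap = colsNF obj R := by
  have hn : 1 ≤ obj.length := List.length_pos_of_ne_nil hobj
  simp only [list_columns_alt, colsNF, if_neg hobj]
  have hnout : (min ((obj.length : Nat) : Int) ((R : Nat) : Int)).toNat = min R obj.length := by
    omega
  have hncB : (-(PySem.Int.floordiv (-(obj.length : Int)) (R : Int))).toNat
      = (obj.length + R - 1) / R := by
    rw [ceil_div_eq _ _ hR1 hn, Int.toNat_natCast]
  rw [hnout, hncB]
  apply List.map_congr_left
  intro r hr
  apply congrArg
  apply congrArg
  apply List.map_congr_left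
  intro c hc
  have e1 : ((c : Int) * ((R : Nat) : Int) + (r : Int)) = ((c * R + r : Nat) : Int) := by
    push_cast; ring
  rw [e1]
  have hs : (if ((c * R + r : Nat) : Int) < ((obj.length : Nat) : Int) then
        (obj.map PySem.Int.toChars).getD (((c * R + r : Nat) : Int)).toNat [] else [])
      = (obj.map PySem.Int.toChars).getD (c * R + r) [] := by
    by_cases hin : c * R + r < obj.length
    · rw [if_pos (by exact_mod_cast hin), Int.toNat_natCast]
    · rw [if_neg (by exact_mod_cast hin),
        List.getD_eq_default _ _ (by simp only [List.length_map]; omega)]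
  rw [hs]

lemma A_eval (obj : List Int) (R : Nat) (gap : Int) (hobj : obj ≠ []) (hR1 : 1 ≤ R) :
    list_columns obj (R : Int) gap = colsNF obj R := by
  have hn : 1 ≤ obj.length := List.length_pos_of_ne_nil hobj
  simp only [list_columns, colsNF]
  rw [if_pos (show ((obj.length : Nat) : Int) > 0 by exact_mod_cast hn)]
  rw [chunks_eq (obj.map PySem.Int.toChars) obj.length R hR1 hn]
  set sobj := obj.map PySem.Int.toChars with hsobjdef
  have hsne : sobj ≠ [] := by simp [hsobjdef, hobj]
  have hslen : sobj.length = obj.length := by rw [hsobjdef]; simp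
  set ncols := (obj.length + R - 1) / R with hncols
  have hdiv := Nat.div_add_mod (obj.length + R - 1) R
  rw [← hncols] at hdiv
  have hmod := Nat.mod_lt (obj.length + R - 1) (show 0 < R by omega)
  have hmc : ncols * R = R * ncols := Nat.mul_comm _ _
  have hsub : (ncols - 1) * R = ncols * R - R := by rw [Nat.sub_mul, one_mul]
  have hnc : 1 ≤ ncols := hncols ▸ Nat.div_pos (by omega) (by omega)
  have hge : obj.length ≤ ncols * R := by omega
  have hlt : (ncols - 1) * R < obj.length := by omega
  have hcps : (List.range ncols).map (fun c => List.take R (List.drop (c * R) sobj))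
      = (List.range (ncols - 1)).map (fun c => List.take R (List.drop (c * R) sobj))
        ++ [List.take R (List.drop ((ncols - 1) * R) sobj)] := by
    conv_lhs => rw [show ncols = (ncols - 1) + 1 by omega]
    rw [List.range_succ, List.map_append, List.map_singleton]
  have hlast : ((List.range ncols).map (fun c => List.take R (List.drop (c * R) sobj))).getLastD []
      = List.take R (List.drop ((ncols - 1) * R) sobj) := by
    rw [hcps, List.getLastD_concat]
  have hdropl : ((List.range ncols).map (fun c => List.take R (List.drop (c * R) sobj))).dropLast
      = (List.range (ncols - 1)).map (fun c => List.take R (List.drop (c * R) sobj)) := by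
    rw [hcps, List.dropLast_concat]
  have hlastlen : (List.take R (List.drop ((ncols - 1) * R) sobj)).length
      = obj.length - (ncols - 1) * R := by
    simp only [List.length_take, List.length_drop, hslen]
    omega
  -- the gap value is a Nat cast
  have hgcast : (if ((obj.length : Nat) : Int) > ((R : Nat) : Int) then (2:Int) else 0)
      = (((if ((obj.length : Nat) : Int) > ((R : Nat) : Int) then (2:Nat) else 0) : Nat) : Int) := by
    split_ifs <;> rfl
  set gN : Nat := if ((obj.length : Nat) : Int) > ((R : Nat) : Int) then (2:Nat) else 0
  -- the transpose rows, uniform in both branches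
  rw [hlast, hlastlen]
  by_cases hfull : obj.length - (ncols - 1) * R = R
  · -- the last chunk is full: no extension
    rw [if_neg (not_not_intro (show ((obj.length - (ncols - 1) * R : Nat) : Int) = ((R:Nat):Int) by
      exact_mod_cast hfull))]
    have hlens : ((List.range ncols).map (fun c => List.take R (List.drop (c * R) sobj))).map
        List.length = List.replicate ncols R := by
      rw [List.eq_replicate_iff]
      refine ⟨by simp, ?_⟩
      intro b hb
      simp only [List.map_map, List.mem_map, List.mem_range, Function.comp] at hb
      obtain ⟨c, hc, rfl⟩ := hb
      simp only [List.length_take, List.length_drop, hslen]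
      have hcm : c * R ≤ (ncols - 1) * R := Nat.mul_le_mul_right _ (by omega)
      omega
    have hzip : pyZipCols ((List.range ncols).map (fun c => List.take R (List.drop (c * R) sobj)))
        = (List.range R).map (fun r =>
            ((List.range ncols).map (fun c => List.take R (List.drop (c * R) sobj))).map
              (fun col => col.getD r [])) := by
      simp only [pyZipCols, hlens, min?_replicate ncols R hnc, Option.getD_some]
    rw [hzip]
    have hminRn : min R obj.length = R := by omega
    rw [hminRn]
    simp only [List.map_map]
    apply List.map_congr_left
    intro r hr
    have hrR : r < R := List.mem_range.mp hr
    simp only [Function.comp]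
    have hrow : (List.range ncols).map
          ((fun col => col.getD r []) ∘ fun c => List.take R (List.drop (c * R) sobj))
        = (List.range ncols).map (fun c => sobj.getD (c * R + r) []) := by
      apply List.map_congr_left
      intro c _
      exact getD_take_drop sobj (c * R) R r hrR
    rw [hrow]
    apply congrArg String.ofList
    rw [hgcast, PySem.List.slice_from _ (Int.natCast_nonneg gN), Int.toNat_natCast]
    rw [show ncols = (ncols - 1) + 1 by omega]
    rw [List.map_map]
    exact row_drop_eq _ (ncols - 1) _ gN _ rfl (fun c => cell_len_le sobj hsne _)
  · -- short last chunk: it is padded with '' up to length obj.length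
    rw [if_pos (show ¬((( obj.length - (ncols - 1) * R : Nat) : Int) = ((R:Nat):Int)) by
      intro h; exact hfull (by exact_mod_cast h))]
    rw [hdropl]
    have hLL1 : 1 ≤ obj.length - (ncols - 1) * R := by omega
    have hLLR : obj.length - (ncols - 1) * R < R := by
      rcases Nat.lt_or_ge (obj.length - (ncols - 1) * R) R with h | h
      · exact h
      · exact absurd (by omega) hfull
    have hlens : (((List.range (ncols - 1)).map (fun c => List.take R (List.drop (c * R) sobj))
          ++ [List.take R (List.drop ((ncols - 1) * R) sobj)
              ++ List.replicate (sobj.length - (obj.length - (ncols - 1) * R)) []]).map List.length)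
        = List.replicate (ncols - 1) R ++ [obj.length] := by
      rw [List.map_append, List.map_singleton]
      congr 1
      · rw [List.eq_replicate_iff]
        refine ⟨by simp, ?_⟩
        intro b hb
        simp only [List.map_map, List.mem_map, List.mem_range, Function.comp] at hb
        obtain ⟨c, hc, rfl⟩ := hb
        simp only [List.length_take, List.length_drop, hslen]
        have hcm : (c + 1) * R ≤ (ncols - 1) * R := Nat.mul_le_mul_right _ (by omega)
        have hsm : (c + 1) * R = c * R + R := Nat.succ_mul c R
        omega
      · simp only [List.length_append, List.length_replicate, hlastlen, hslen]
        congr 1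
        omega
    have hzip : pyZipCols ((List.range (ncols - 1)).map (fun c => List.take R (List.drop (c * R) sobj))
          ++ [List.take R (List.drop ((ncols - 1) * R) sobj)
              ++ List.replicate (sobj.length - (obj.length - (ncols - 1) * R)) []])
        = (List.range (min R obj.length)).map (fun r =>
            ((List.range (ncols - 1)).map (fun c => List.take R (List.drop (c * R) sobj))
              ++ [List.take R (List.drop ((ncols - 1) * R) sobj)
                  ++ List.replicate (sobj.length - (obj.length - (ncols - 1) * R)) []]).map
              (fun (col : List (List Char)) => col.getD r [])) := by
      simp only [pyZipCols, hlens, min?_replicate_append]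
      have he : (if ncols - 1 = 0 then obj.length else min R obj.length) = min R obj.length := by
        split_ifs with h
        · have h0 : (ncols - 1) * R = 0 := by rw [h, Nat.zero_mul]
          omega
        · rfl
      rw [he, Option.getD_some]
    rw [hzip]
    simp only [List.map_map]
    apply List.map_congr_left
    intro r hr
    have hrR : r < R := by
      have := List.mem_range.mp hr
      omega
    simp only [Function.comp]
    have hrow : ((List.range (ncols - 1)).map (fun c => List.take R (List.drop (c * R) sobj))
          ++ [List.take R (List.drop ((ncols - 1) * R) sobj)
              ++ List.replicate (sobj.length - (obj.length - (ncols - 1) * R)) []]).map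
          (fun (col : List (List Char)) => col.getD r [])
        = (List.range ncols).map (fun c => sobj.getD (c * R + r) []) := by
      rw [List.map_append, List.map_singleton, getD_append_replicate_nil,
        getD_take_drop sobj ((ncols - 1) * R) R r hrR]
      conv_rhs => rw [show ncols = (ncols - 1) + 1 by omega, List.range_succ, List.map_append,
        List.map_singleton]
      congr 1
      simp only [List.map_map]
      apply List.map_congr_left
      intro c _
      exact getD_take_drop sobj (c * R) R r hrR
    rw [hrow]
    apply congrArg String.ofList
    rw [hgcast, PySem.List.slice_from _ (Int.natCast_nonneg gN), Int.toNat_natCast]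
    rw [show ncols = (ncols - 1) + 1 by omega]
    rw [List.map_map]
    exact row_drop_eq _ (ncols - 1) _ gN _ rfl (fun c => cell_len_le sobj hsne _)

-- ===== VERDICT (by name: the statement is the Claim_ definition above) =====
theorem list_columns_spec : Claim_equal_list_columns := by
  unfold Claim_equal_list_columns
  intro obj rows gap _ hpre
  unfold Spec_list_columns
  by_cases hobj : obj = []
  · subst hobj
    simp [list_columns, list_columns_alt]
  · have hR : 1 ≤ rows := hpre.resolve_left hobj
    obtain ⟨R, rfl⟩ : ∃ R : Nat, rows = (R : Int) := ⟨rows.toNat, (Int.toNat_of_nonneg (by omega)).symm⟩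
    rw [A_eval obj R gap hobj (by exact_mod_cast hR), B_eval obj R gap hobj (by exact_mod_cast hR)]
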